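-- pv_equiv track=rewrite | github.com/eatingallday/graphRAG | agents/taint_agent.py | _smali_type
-- ===== SOURCE A (Python) =====
-- _SMALI_TO_JAVA = {
--     "V": "void", "Z": "boolean", "B": "byte", "C": "char",
--     "S": "short", "I": "int",  "J": "long", "F": "float", "D": "double",
-- }
--
-- def _smali_type(t: str) -> str:
--     if t in _SMALI_TO_JAVA:
--         return _SMALI_TO_JAVA[t]
--     if t.startswith("["):
--         return _smali_type(t[1:]) + "[]"
--     if t.startswith("L") and t.endswith(";"):
--         return t[1:-1].replace("/", ".")
--     return t
-- ===== SOURCE B (Python) =====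
-- _SMALI_TO_JAVA = {
--     "V": "void", "Z": "boolean", "B": "byte", "C": "char",
--     "S": "short", "I": "int",  "J": "long", "F": "float", "D": "double",
-- }
--
-- def _smali_type(t: str) -> str:
--     # count leading '[' (array dimensions), convert the element type once, append '[]' * n
--     n = 0
--     for ch in t:
--         if ch != "[":
--             break
--         n += 1
--     rest = t[n:]
--     if rest in _SMALI_TO_JAVA:
--         base = _SMALI_TO_JAVA[rest]
--     elif rest.startswith("L") and rest.endswith(";"):
--         base = rest[1:-1].replace("/", ".")
--     else:
--         base = rest
--     return base + "[]" * n
-- ===== Notes on version B (the rewrite author's own statement) =====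
-- stated objective: alternative
-- what changed: Replaces A's recursive peeling of one '[' per call with a single pass that counts the leading '[' dimensions, converts the element type exactly once, and appends '[]' * n.
import Mathlib
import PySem

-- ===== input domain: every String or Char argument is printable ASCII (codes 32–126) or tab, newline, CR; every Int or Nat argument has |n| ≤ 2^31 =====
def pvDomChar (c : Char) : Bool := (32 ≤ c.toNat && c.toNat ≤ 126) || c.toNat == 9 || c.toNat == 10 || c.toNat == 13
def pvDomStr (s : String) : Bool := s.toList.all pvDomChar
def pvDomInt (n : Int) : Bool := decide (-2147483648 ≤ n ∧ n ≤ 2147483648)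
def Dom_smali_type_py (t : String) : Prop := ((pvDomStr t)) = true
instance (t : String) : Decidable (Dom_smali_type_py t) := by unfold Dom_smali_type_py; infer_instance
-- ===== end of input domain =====

-- B changes A's recursive '['-peeling into one count-then-convert pass; return values are identical.

-- ===== PORT A =====
-- the module-level _SMALI_TO_JAVA dict (keys/values as char lists)
def smaliDict : PySem.Dict (List Char) (List Char) :=
  PySem.Dict.ofList [("V".toList, "void".toList), ("Z".toList, "boolean".toList),
    ("B".toList, "byte".toList), ("C".toList, "char".toList), ("S".toList, "short".toList),
    ("I".toList, "int".toList), ("J".toList, "long".toList), ("F".toList, "float".toList),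
    ("D".toList, "double".toList)]

-- _smali_type, transliterated on the char list (recursion on t[1:])
def smaliA (cs : List Char) : List Char :=
  match PySem.Dict.get? smaliDict cs with          -- if t in _SMALI_TO_JAVA: return _SMALI_TO_JAVA[t]
  | some v => v
  | none =>
    if h : PySem.Chars.startswith cs "[".toList then    -- if t.startswith("["):
      smaliA (PySem.List.slice cs (some 1) none) ++ "[]".toList   -- return _smali_type(t[1:]) + "[]"
    else if PySem.Chars.startswith cs "L".toList && PySem.Chars.endswith cs ";".toList then
      PySem.Chars.replace (PySem.List.slice cs (some 1) (some (-1))) "/".toList ".".toList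
    else cs
termination_by cs.length
decreasing_by
  rw [PySem.List.slice_from_one]
  have : cs ≠ [] := by
    intro hnil
    rw [hnil] at h
    simp [PySem.Chars.startswith] at h
  cases cs with
  | nil => exact absurd rfl this
  | cons a l => simp

def smali_type_py (t : String) : String := String.ofList (smaliA t.toList)

-- ===== PORT B =====
-- count leading '[' characters (the for/break loop of Source B)
def smaliBCount : List Char → Nat
  | [] => 0
  | c :: rest => if c ≠ '[' then 0 else smaliBCount rest + 1

-- convert the element type once (the if/elif/else of Source B)
def smaliBBase (rest : List Char) : List Char :=
  match PySem.Dict.get? smaliDict rest with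
  | some v => v
  | none =>
    if PySem.Chars.startswith rest "L".toList && PySem.Chars.endswith rest ";".toList then
      PySem.Chars.replace (PySem.List.slice rest (some 1) (some (-1))) "/".toList ".".toList
    else rest

def smali_type_py_alt (t : String) : String :=
  let cs := t.toList
  let n := smaliBCount cs
  let rest := PySem.List.slice cs (some (n : Int)) none        -- rest = t[n:]
  String.ofList (smaliBBase rest ++ (List.replicate n "[]".toList).flatten)  -- base + "[]" * n

-- ===== PRECONDITION & SPEC =====
def Spec_smali_type_py (t : String) (out : String) : Prop := out = smali_type_py_alt t
instance (t : String) (out : String) : Decidable (Spec_smali_type_py t out) := by unfold Spec_smali_type_py; infer_instance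

-- ===== CLAIM (what is proved, stated in full; the proofs are below) =====
def Claim_equal_smali_type_py : Prop := ∀ (t : String), Dom_smali_type_py t → Spec_smali_type_py t (smali_type_py t)

-- ===== LEMMAS AND PROOFS =====

-- no dict key begins with '['
theorem smaliDict_get?_bracket (l : List Char) : PySem.Dict.get? smaliDict ('[' :: l) = none := by
  simp [smaliDict, PySem.Dict.get?, PySem.Dict.ofList, PySem.Dict.update, PySem.Dict.empty,
    PySem.Dict.insert]

theorem smaliA_eq (cs : List Char) :
    smaliA cs = smaliBBase (PySem.List.slice cs (some ((smaliBCount cs : Nat) : Int)) none)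
      ++ (List.replicate (smaliBCount cs) "[]".toList).flatten := by
  induction cs with
  | nil =>
    rw [smaliA]
    simp [smaliBCount, smaliBBase]
    decide
  | cons c l ih =>
    by_cases hc : c = '['
    · subst hc
      rw [smaliA, smaliDict_get?_bracket]
      have hn : smaliBCount ('[' :: l) = smaliBCount l + 1 := by simp [smaliBCount]
      rw [hn]
      simp only [PySem.List.slice_from_natCast, List.drop_succ_cons] at ih ⊢
      rw [dif_pos (by simp [PySem.Chars.startswith])]
      rw [PySem.List.slice_from_one, List.tail_cons, ih]
      simp [List.replicate_succ', List.flatten_append]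
    · -- head is not '[': count is 0, slice is the whole list, branches coincide
      rw [smaliA]
      have hcount : smaliBCount (c :: l) = 0 := by simp [smaliBCount, hc]
      rw [hcount]
      simp only [PySem.List.slice_from_natCast, List.drop_zero, List.replicate_zero,
        List.flatten_nil, List.append_nil]
      rw [smaliBBase]
      cases hget : PySem.Dict.get? smaliDict (c :: l) with
      | some v => rfl
      | none =>
        simp only []
        rw [dif_neg (by
          intro hsw
          have := (PySem.Chars.startswith_iff _ _).mp hsw
          rcases this with ⟨rest, hrest⟩
          simp at hrest
          exact hc hrest.1.symm)]

theorem smali_type_py_spec : Claim_equal_smali_type_py := by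
  intro t _
  unfold Spec_smali_type_py smali_type_py smali_type_py_alt
  rw [smaliA_eq]
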